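-- pv_equiv track=rewrite | github.com/fmcooper/matchingproblems | matchingproblems/generator/generator_shared.py | create_string_pref
-- ===== SOURCE A (Python) =====
-- def create_string_pref(pref_list, ties_indicators):
--     """Creates preference list string for output.
--
--     Args:
--         pref_list: The preference list of an agent.
--         ties_indicators: Whether elements of this preference list are tied.
--
--     Returns:
--         A preference list string for output.
--     """
--     string_pref = []
--     in_tie = False
--     for i in range(len(pref_list)):
--         if not in_tie and ties_indicators[i] and i < len(pref_list) - 1:
--             string_pref.append('(' + str(pref_list[i]))
--             in_tie = True
--         elif in_tie and not ties_indicators[i]: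
--             string_pref.append(str(pref_list[i]) + ')')
--             in_tie = False
--         elif i == len(pref_list) - 1 and in_tie:
--             string_pref.append(str(pref_list[i]) + ')')
--         else:
--             string_pref.append(str(pref_list[i]))
--     return string_pref
-- ===== SOURCE B (Python) =====
-- def create_string_pref(pref_list, ties_indicators):
--     n = len(pref_list)
--     # Pass 1: collect (start, end) index ranges of tie groups.
--     groups = []
--     start = None
--     for i in range(n):
--         if start is None:
--             if ties_indicators[i] and i < n - 1:
--                 start = i
--         elif not ties_indicators[i]:
--             groups.append((start, i))
--             start = None
--     if start is not None:
--         groups.append((start, n - 1))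
--     starts = {s for s, _ in groups}
--     ends = {e for _, e in groups}
--     # Pass 2: emit.
--     return [('(' if i in starts else '') + str(pref_list[i]) + (')' if i in ends else '')
--             for i in range(n)]
-- ===== Notes on version B (the rewrite author's own statement) =====
-- stated objective: alternative
-- what changed: B replaces A's single pass with an inline in_tie flag by a two-phase algorithm: a first pass builds an explicit table of (start, end) tie-group index ranges, and a second pass emits each element with '(' / ')' decided by set membership of its index among group starts/ends.
import Mathlib
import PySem

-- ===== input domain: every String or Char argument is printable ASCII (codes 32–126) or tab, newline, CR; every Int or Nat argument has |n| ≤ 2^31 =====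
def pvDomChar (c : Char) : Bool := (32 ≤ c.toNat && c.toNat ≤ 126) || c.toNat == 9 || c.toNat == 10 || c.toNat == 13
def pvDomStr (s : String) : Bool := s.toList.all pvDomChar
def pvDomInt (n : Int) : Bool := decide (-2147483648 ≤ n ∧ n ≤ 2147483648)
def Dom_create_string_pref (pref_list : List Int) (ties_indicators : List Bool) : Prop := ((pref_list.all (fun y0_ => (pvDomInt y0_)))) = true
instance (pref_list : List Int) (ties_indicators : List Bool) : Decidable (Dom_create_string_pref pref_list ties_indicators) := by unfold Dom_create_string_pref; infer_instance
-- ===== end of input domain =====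

-- B separates tie-group detection (a first pass building (start,end) ranges) from
-- string assembly (a second pass over indices), instead of A's inline in_tie flag;
-- objective: alternative decomposition, same exact output.

-- ===== PORT A =====
-- the body of A's for-loop, as a named step function over the state (string_pref, in_tie)
def csp_stepA (pref_list : List Int) (ties_indicators : List Bool) (n : Int)
    (st : List String × Bool) (i : Int) : List String × Bool :=
  let ti := PySem.List.pyGetD ties_indicators i false
  if !st.2 && ti && decide (i < n - 1) then
    (st.1 ++ ["(" ++ PySem.Int.toStr (PySem.List.pyGetD pref_list i 0)], true)
  else if st.2 && !ti then
    (st.1 ++ [PySem.Int.toStr (PySem.List.pyGetD pref_list i 0) ++ ")"], false)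
  else if decide (i = n - 1) && st.2 then
    (st.1 ++ [PySem.Int.toStr (PySem.List.pyGetD pref_list i 0) ++ ")"], st.2)
  else
    (st.1 ++ [PySem.Int.toStr (PySem.List.pyGetD pref_list i 0)], st.2)

def create_string_pref (pref_list : List Int) (ties_indicators : List Bool) : List String :=
  let n : Int := pref_list.length
  ((PySem.List.pyRange 0 n 1).foldl (csp_stepA pref_list ties_indicators n) ([], false)).1

-- ===== PORT B =====
-- B's pass 1 loop body: state (groups, start)
def csp_stepB (ties_indicators : List Bool) (n : Int)
    (st : List (Int × Int) × Option Int) (i : Int) : List (Int × Int) × Option Int :=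
  match st.2 with
  | none => if PySem.List.pyGetD ties_indicators i false && decide (i < n - 1)
            then (st.1, some i) else st
  | some s => if !(PySem.List.pyGetD ties_indicators i false)
              then (st.1 ++ [(s, i)], none) else st

def create_string_pref_alt (pref_list : List Int) (ties_indicators : List Bool) : List String :=
  let n : Int := pref_list.length
  let p := (PySem.List.pyRange 0 n 1).foldl (csp_stepB ties_indicators n) ([], none)
  let groups : List (Int × Int) :=
    match p.2 with
    | some s => p.1 ++ [(s, n - 1)]
    | none => p.1
  let starts : PySem.Set Int := PySem.Set.ofList (groups.map Prod.fst)
  let ends : PySem.Set Int := PySem.Set.ofList (groups.map Prod.snd)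
  (PySem.List.pyRange 0 n 1).map (fun i =>
    (if PySem.Set.contains starts i then "(" else "")
      ++ PySem.Int.toStr (PySem.List.pyGetD pref_list i 0)
      ++ (if PySem.Set.contains ends i then ")" else ""))

-- ===== PRECONDITION & SPEC =====
-- A indexes ties_indicators[i] for every i < len(pref_list); it raises IndexError
-- when ties_indicators is shorter than pref_list, so exactly those inputs are excluded.
def Pre_create_string_pref (pref_list : List Int) (ties_indicators : List Bool) : Prop :=
  pref_list.length ≤ ties_indicators.length
instance (pref_list : List Int) (ties_indicators : List Bool) : Decidable (Pre_create_string_pref pref_list ties_indicators) := by unfold Pre_create_string_pref; infer_instance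
def pvWitness_create_string_pref : List Int × List Bool := ([3, 1, 2], [true, true, false])

def Spec_create_string_pref (pref_list : List Int) (ties_indicators : List Bool) (out : List String) : Prop := out = create_string_pref_alt pref_list ties_indicators
instance (pref_list : List Int) (ties_indicators : List Bool) (out : List String) : Decidable (Spec_create_string_pref pref_list ties_indicators out) := by unfold Spec_create_string_pref; infer_instance

-- ===== CLAIM (what is proved, stated in full; the proofs are below) =====
def Claim_equal_create_string_pref : Prop := ∀ (pref_list : List Int) (ties_indicators : List Bool), Dom_create_string_pref pref_list ties_indicators → Pre_create_string_pref pref_list ties_indicators → Spec_create_string_pref pref_list ties_indicators (create_string_pref pref_list ties_indicators)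

-- ===== LEMMAS AND PROOFS =====

-- the string B emits at index j, phrased over an intermediate pass-1 state
def csp_emit (pref_list : List Int) (n : Int) (gs : List (Int × Int)) (st : Option Int)
    (j : Int) : String :=
  (if j ∈ gs.map Prod.fst ∨ st = some j then "(" else "")
    ++ PySem.Int.toStr (PySem.List.pyGetD pref_list j 0)
    ++ (if j ∈ gs.map Prod.snd ∨ (st.isSome ∧ j = n - 1) then ")" else "")

lemma csp_emit_congr (pref_list : List Int) (n : Int) (gs gs' : List (Int × Int))
    (st st' : Option Int) (j : Int)
    (h1 : (j ∈ gs.map Prod.fst ∨ st = some j) ↔ (j ∈ gs'.map Prod.fst ∨ st' = some j))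
    (h2 : (j ∈ gs.map Prod.snd ∨ (st.isSome ∧ j = n - 1))
        ↔ (j ∈ gs'.map Prod.snd ∨ (st'.isSome ∧ j = n - 1))) :
    csp_emit pref_list n gs st j = csp_emit pref_list n gs' st' j := by
  unfold csp_emit
  congr 1
  · congr 1
    exact if_congr h1 rfl rfl
  · exact if_congr h2 rfl rfl

-- loop invariant tying A's state after k steps to B's pass-1 state after k steps
lemma csp_inv (pref_list : List Int) (ties_indicators : List Bool) (k : Nat)
    (hk : (k : Int) ≤ (pref_list.length : Int)) :
    (((PySem.List.pyRange 0 (k : Int) 1).foldl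
        (csp_stepA pref_list ties_indicators (pref_list.length : Int)) ([], false)).2
      = (((PySem.List.pyRange 0 (k : Int) 1).foldl
        (csp_stepB ties_indicators (pref_list.length : Int)) ([], none)).2).isSome)
    ∧ (∀ p ∈ ((PySem.List.pyRange 0 (k : Int) 1).foldl
        (csp_stepB ties_indicators (pref_list.length : Int)) ([], none)).1,
        0 ≤ p.1 ∧ p.1 < p.2 ∧ p.2 < (k : Int))
    ∧ (∀ s, ((PySem.List.pyRange 0 (k : Int) 1).foldl
        (csp_stepB ties_indicators (pref_list.length : Int)) ([], none)).2 = some s →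
        0 ≤ s ∧ s < (k : Int) ∧ s < (pref_list.length : Int) - 1)
    ∧ (((PySem.List.pyRange 0 (k : Int) 1).foldl
        (csp_stepA pref_list ties_indicators (pref_list.length : Int)) ([], false)).1
      = (PySem.List.pyRange 0 (k : Int) 1).map
          (csp_emit pref_list (pref_list.length : Int)
            (((PySem.List.pyRange 0 (k : Int) 1).foldl
              (csp_stepB ties_indicators (pref_list.length : Int)) ([], none)).1)
            (((PySem.List.pyRange 0 (k : Int) 1).foldl
              (csp_stepB ties_indicators (pref_list.length : Int)) ([], none)).2))) := by
  set n : Int := (pref_list.length : Int) with hn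
  induction k with
  | zero =>
      simp [PySem.List.pyRange_one_eq_nil]
  | succ k ih =>
      have hk' : (k : Int) ≤ n := by push_cast at hk ⊢; omega
      have hkn : (k : Int) + 1 ≤ n := by push_cast at hk; omega
      obtain ⟨ih1, ih2, ih3, ih4⟩ := ih hk'
      have hsplit : PySem.List.pyRange 0 ((k + 1 : Nat) : Int) 1
          = PySem.List.pyRange 0 (k : Int) 1 ++ [(k : Int)] := by
        push_cast
        exact PySem.List.pyRange_one_succ_right (by positivity)
      rw [hsplit]
      rw [List.foldl_append, List.foldl_append, List.map_append]
      simp only [List.foldl_cons, List.foldl_nil, List.map_cons, List.map_nil]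
      generalize hAeq : List.foldl (csp_stepA pref_list ties_indicators n)
        (([], false) : List String × Bool) (PySem.List.pyRange 0 (k : Int) 1) = Ast
        at ih1 ih4 ⊢
      generalize hBeq : List.foldl (csp_stepB ties_indicators n)
        (([], none) : List (Int × Int) × Option Int) (PySem.List.pyRange 0 (k : Int) 1) = Bst
        at ih1 ih2 ih3 ih4 ⊢
      clear hAeq hBeq
      obtain ⟨sp, tie⟩ := Ast
      obtain ⟨gs, st⟩ := Bst
      dsimp only at ih1 ih2 ih3 ih4
      have hmem : ∀ j, j ∈ PySem.List.pyRange 0 (k : Int) 1 → 0 ≤ j ∧ j < (k : Int) :=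
        fun j hj => PySem.List.mem_pyRange_one.1 hj
      have hnofst : ((k : Int) ∈ gs.map Prod.fst) → False := by
        intro h
        simp only [List.mem_map] at h
        obtain ⟨p, hp, hpe⟩ := h
        have := ih2 p hp
        omega
      have hnosnd : ((k : Int) ∈ gs.map Prod.snd) → False := by
        intro h
        simp only [List.mem_map] at h
        obtain ⟨p, hp, hpe⟩ := h
        have := ih2 p hp
        omega
      rcases st with _ | s
      · -- state: not in a tie
        simp only [Option.isSome_none] at ih1
        subst ih1
        by_cases hc : PySem.List.pyGetD ties_indicators (k : Int) false = true
            ∧ (k : Int) < n - 1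
        · -- open a new group at k
          obtain ⟨htb, hlt⟩ := hc
          have hsA : csp_stepA pref_list ties_indicators n (sp, false) (k : Int)
              = (sp ++ ["(" ++ PySem.Int.toStr (PySem.List.pyGetD pref_list (k : Int) 0)],
                  true) := by
            simp [csp_stepA, htb, hlt]
          have hsB : csp_stepB ties_indicators n (gs, none) (k : Int)
              = (gs, some (k : Int)) := by
            simp [csp_stepB, htb, hlt]
          rw [hsA, hsB]
          dsimp only
          refine ⟨rfl, ?_, ?_, ?_⟩
          · intro p hp
            obtain ⟨h1, h2, h3⟩ := ih2 p hp
            refine ⟨h1, h2, by push_cast; omega⟩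
          · intro s hs
            injection hs with hs
            subst hs
            refine ⟨by positivity, by push_cast; omega, hlt⟩
          · rw [ih4]
            congr 1
            · apply List.map_congr_left
              intro j hj
              obtain ⟨hj0, hjk⟩ := hmem j hj
              apply csp_emit_congr
              · constructor
                · rintro (h | h)
                  · exact Or.inl h
                  · cases h
                · rintro (h | h)
                  · exact Or.inl h
                  · exact absurd (Option.some.inj h) (by omega)
              · constructor
                · rintro (h | ⟨h, _⟩)
                  · exact Or.inl h
                  · simp at h
                · rintro (h | ⟨_, h⟩)
                  · exact Or.inl h
                  · exact absurd h (by omega)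
            · have hC1 : ((k : Int) ∈ gs.map Prod.fst ∨ True) := Or.inr trivial
              have hC2 : ¬ ((k : Int) ∈ gs.map Prod.snd
                  ∨ ((some (k : Int) : Option Int).isSome = true ∧ (k : Int) = n - 1)) := by
                rintro (h | ⟨_, h⟩)
                · exact hnosnd h
                · omega
              simp only [csp_emit]
              rw [if_pos hC1, if_neg hC2]
              simp
        · -- stay out of any tie: plain element
          have hsA : csp_stepA pref_list ties_indicators n (sp, false) (k : Int)
              = (sp ++ [PySem.Int.toStr (PySem.List.pyGetD pref_list (k : Int) 0)],
                  false) := by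
            by_cases h : PySem.List.pyGetD ties_indicators (k : Int) false = true
            · have hl : ¬ (k : Int) < n - 1 := fun hl => hc ⟨h, hl⟩
              simp [csp_stepA, h, hl]
            · simp [csp_stepA, h]
          have hsB : csp_stepB ties_indicators n (gs, none) (k : Int) = (gs, none) := by
            by_cases h : PySem.List.pyGetD ties_indicators (k : Int) false = true
            · have hl : ¬ (k : Int) < n - 1 := fun hl => hc ⟨h, hl⟩
              simp [csp_stepB, h, hl]
            · simp [csp_stepB, h]
          rw [hsA, hsB]
          dsimp only
          refine ⟨rfl, ?_, ?_, ?_⟩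
          · intro p hp
            obtain ⟨h1, h2, h3⟩ := ih2 p hp
            refine ⟨h1, h2, by push_cast; omega⟩
          · intro s hs
            cases hs
          · rw [ih4]
            congr 1
            have hC1 : ¬ ((k : Int) ∈ gs.map Prod.fst
                ∨ (none : Option Int) = some (k : Int)) := by
              rintro (h | h)
              · exact hnofst h
              · cases h
            have hC2 : ¬ ((k : Int) ∈ gs.map Prod.snd
                ∨ ((none : Option Int).isSome = true ∧ (k : Int) = n - 1)) := by
              rintro (h | ⟨h, _⟩)
              · exact hnosnd h
              · cases h
            simp only [csp_emit]
            rw [if_neg hC1, if_neg hC2]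
            simp
      · -- state: inside a tie opened at s
        obtain ⟨hs0, hsk, hsn⟩ := ih3 s rfl
        simp only [Option.isSome_some] at ih1
        subst ih1
        by_cases htb : PySem.List.pyGetD ties_indicators (k : Int) false = true
        · by_cases hk1 : (k : Int) = n - 1
          · -- last element while in a tie: close it (A's third branch)
            have hsA : csp_stepA pref_list ties_indicators n (sp, true) (k : Int)
                = (sp ++ [PySem.Int.toStr (PySem.List.pyGetD pref_list (k : Int) 0) ++ ")"],
                    true) := by
              simp [csp_stepA, htb, decide_eq_true hk1]
            have hsB : csp_stepB ties_indicators n (gs, some s) (k : Int)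
                = (gs, some s) := by
              simp [csp_stepB, htb]
            rw [hsA, hsB]
            dsimp only
            refine ⟨rfl, ?_, ?_, ?_⟩
            · intro p hp
              obtain ⟨h1, h2, h3⟩ := ih2 p hp
              refine ⟨h1, h2, by push_cast; omega⟩
            · intro s' hs'
              injection hs' with hs'
              subst hs'
              refine ⟨hs0, by push_cast; omega, hsn⟩
            · rw [ih4]
              congr 1
              have hC1 : ¬ ((k : Int) ∈ gs.map Prod.fst
                  ∨ (some s : Option Int) = some (k : Int)) := by
                rintro (h | h)
                · exact hnofst h
                · exact absurd (Option.some.inj h) (by omega)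
              have hC2 : ((k : Int) ∈ gs.map Prod.snd
                  ∨ ((some s : Option Int).isSome = true ∧ (k : Int) = n - 1)) :=
                Or.inr ⟨rfl, hk1⟩
              simp only [csp_emit]
              rw [if_neg hC1, if_pos hC2]
              simp
          · -- 'else' branch: inside a tie, plain element
            have hsA : csp_stepA pref_list ties_indicators n (sp, true) (k : Int)
                = (sp ++ [PySem.Int.toStr (PySem.List.pyGetD pref_list (k : Int) 0)],
                    true) := by
              simp [csp_stepA, htb, hk1]
            have hsB : csp_stepB ties_indicators n (gs, some s) (k : Int)
                = (gs, some s) := by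
              simp [csp_stepB, htb]
            rw [hsA, hsB]
            dsimp only
            refine ⟨rfl, ?_, ?_, ?_⟩
            · intro p hp
              obtain ⟨h1, h2, h3⟩ := ih2 p hp
              refine ⟨h1, h2, by push_cast; omega⟩
            · intro s' hs'
              injection hs' with hs'
              subst hs'
              refine ⟨hs0, by push_cast; omega, hsn⟩
            · rw [ih4]
              congr 1
              have hC1 : ¬ ((k : Int) ∈ gs.map Prod.fst
                  ∨ (some s : Option Int) = some (k : Int)) := by
                rintro (h | h)
                · exact hnofst h
                · exact absurd (Option.some.inj h) (by omega)
              have hC2 : ¬ ((k : Int) ∈ gs.map Prod.snd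
                  ∨ ((some s : Option Int).isSome = true ∧ (k : Int) = n - 1)) := by
                rintro (h | ⟨_, h⟩)
                · exact hnosnd h
                · exact hk1 h
              simp only [csp_emit]
              rw [if_neg hC1, if_neg hC2]
              simp
        · -- ties_indicators[k] is false: close the group at k (A's second branch)
          have htb' : PySem.List.pyGetD ties_indicators (k : Int) false = false :=
            Bool.eq_false_iff.2 htb
          have hsA : csp_stepA pref_list ties_indicators n (sp, true) (k : Int)
              = (sp ++ [PySem.Int.toStr (PySem.List.pyGetD pref_list (k : Int) 0) ++ ")"],
                  false) := by
            simp [csp_stepA, htb']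
          have hsB : csp_stepB ties_indicators n (gs, some s) (k : Int)
              = (gs ++ [(s, (k : Int))], none) := by
            simp [csp_stepB, htb']
          rw [hsA, hsB]
          dsimp only
          refine ⟨rfl, ?_, ?_, ?_⟩
          · intro p hp
            rcases List.mem_append.1 hp with hp | hp
            · obtain ⟨h1, h2, h3⟩ := ih2 p hp
              refine ⟨h1, h2, by push_cast; omega⟩
            · simp only [List.mem_singleton] at hp
              subst hp
              refine ⟨hs0, hsk, by push_cast; omega⟩
          · intro s' hs'
            cases hs'
          · rw [ih4]
            congr 1
            · apply List.map_congr_left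
              intro j hj
              obtain ⟨hj0, hjk⟩ := hmem j hj
              apply csp_emit_congr
              · constructor
                · rintro (h | h)
                  · refine Or.inl ?_
                    simp only [List.map_append, List.mem_append, List.map_cons,
                      List.map_nil, List.mem_singleton]
                    exact Or.inl h
                  · refine Or.inl ?_
                    simp only [List.map_append, List.mem_append, List.map_cons,
                      List.map_nil, List.mem_singleton]
                    exact Or.inr (Option.some.inj h).symm
                · rintro (h | h)
                  · simp only [List.map_append, List.mem_append, List.map_cons,
                      List.map_nil, List.mem_singleton] at h
                    rcases h with h | h
                    · exact Or.inl h
                    · exact Or.inr (by rw [h])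
                  · cases h
              · constructor
                · rintro (h | ⟨_, h⟩)
                  · refine Or.inl ?_
                    simp only [List.map_append, List.mem_append, List.map_cons,
                      List.map_nil, List.mem_singleton]
                    exact Or.inl h
                  · exact absurd h (by omega)
                · rintro (h | ⟨h, _⟩)
                  · simp only [List.map_append, List.mem_append, List.map_cons,
                      List.map_nil, List.mem_singleton] at h
                    rcases h with h | h
                    · exact Or.inl h
                    · exact absurd h (by omega)
                  · cases h
            · have hC1 : ¬ ((k : Int) ∈ (gs ++ [(s, (k : Int))]).map Prod.fst
                  ∨ (none : Option Int) = some (k : Int)) := by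
                rintro (h | h)
                · simp only [List.map_append, List.mem_append, List.map_cons,
                    List.map_nil, List.mem_singleton] at h
                  rcases h with h | h
                  · exact hnofst h
                  · omega
                · cases h
              have hC2 : ((k : Int) ∈ (gs ++ [(s, (k : Int))]).map Prod.snd
                  ∨ ((none : Option Int).isSome = true ∧ (k : Int) = n - 1)) := by
                refine Or.inl ?_
                simp
              simp only [csp_emit]
              rw [if_neg hC1, if_pos hC2]
              simp

lemma set_ofList_contains_int (l : List Int) (x : Int) :
    PySem.Set.contains (PySem.Set.ofList l) x = true ↔ x ∈ l := by
  have h := PySem.Set.mem_ofList (xs := l) (y := x)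
  constructor
  · intro hc
    exact h.1 (by simpa [PySem.Set.contains] using hc)
  · intro hm
    simpa [PySem.Set.contains] using h.2 hm

lemma csp_final (pref_list : List Int) (ties_indicators : List Bool) :
    create_string_pref pref_list ties_indicators
      = create_string_pref_alt pref_list ties_indicators := by
  obtain ⟨h1, h2, h3, h4⟩ := csp_inv pref_list ties_indicators pref_list.length (le_refl _)
  simp only [create_string_pref, create_string_pref_alt]
  rw [h4]
  generalize hBeq : List.foldl (csp_stepB ties_indicators (pref_list.length : Int))
    (([], none) : List (Int × Int) × Option Int)
    (PySem.List.pyRange 0 (pref_list.length : Int) 1) = Bst at h2 h3 ⊢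
  clear hBeq h1
  obtain ⟨gs, st⟩ := Bst
  dsimp only at h2 h3 ⊢
  apply List.map_congr_left
  intro j hj
  obtain ⟨hj0, hjn⟩ := PySem.List.mem_pyRange_one.1 hj
  rcases st with _ | s
  · -- loop ended with no open group: groups are exactly gs
    simp only [csp_emit]
    congr 1
    · congr 1
      apply if_congr _ rfl rfl
      rw [set_ofList_contains_int]
      constructor
      · rintro (h | h)
        · exact h
        · cases h
      · exact Or.inl
    · apply if_congr _ rfl rfl
      rw [set_ofList_contains_int]
      constructor
      · rintro (h | ⟨h, _⟩)
        · exact h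
        · cases h
      · exact Or.inl
  · -- loop ended inside a tie: the pending group closes at the final index
    simp only [csp_emit]
    congr 1
    · congr 1
      apply if_congr _ rfl rfl
      rw [set_ofList_contains_int]
      simp only [List.map_append, List.mem_append, List.map_cons, List.map_nil,
        List.mem_singleton]
      constructor
      · rintro (h | h)
        · exact Or.inl h
        · exact Or.inr (Option.some.inj h).symm
      · rintro (h | h)
        · exact Or.inl h
        · exact Or.inr (by rw [h])
    · apply if_congr _ rfl rfl
      rw [set_ofList_contains_int]
      simp only [List.map_append, List.mem_append, List.map_cons, List.map_nil,
        List.mem_singleton]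
      constructor
      · rintro (h | ⟨_, h⟩)
        · exact Or.inl h
        · exact Or.inr h
      · rintro (h | h)
        · exact Or.inl h
        · exact Or.inr ⟨rfl, h⟩

-- ===== VERDICT (by name: the statement is the Claim_ definition above) =====
theorem create_string_pref_spec : Claim_equal_create_string_pref := by
  intro pref ties _ _
  unfold Spec_create_string_pref
  exact csp_final pref ties
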